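-- pv_equiv track=rewrite | github.com/pedrog09/SplitNegacao | SplitTcomp.py | split_negation
-- ===== SOURCE A (Python) =====
-- def split_negation(texto, delimitador):
--     saida = []
--     buffer = ""
--     secaoDelimitador = False
--
--     i = 0
--     while i < len(texto):
--         if texto[i:i+len(delimitador)] == delimitador:
--             if buffer:
--                 saida.append(buffer)
--                 buffer = ""
--             secaoDelimitador = True
--             buffer += delimitador
--             i += len(delimitador)
--         else:
--             if secaoDelimitador:
--                 saida.append(buffer)
--                 buffer = ""
--                 secaoDelimitador = False
--             buffer += texto[i]
--             i += 1
--
--     if buffer: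
--         saida.append(buffer)
--
--     return saida
-- ===== SOURCE B (Python) =====
-- def split_negation(texto, delimitador):
--     n = len(texto)
--     L = len(delimitador)
--     # pass 1: collect the start index of each (non-overlapping) delimiter occurrence
--     positions = []
--     i = 0
--     while i < n:
--         if texto[i:i+L] == delimitador:
--             positions.append(i)
--             i += L
--         else:
--             i += 1
--     # pass 2: emit the chunk before each occurrence, then the delimiter itself
--     saida = []
--     prev = 0
--     for p in positions:
--         if prev < p:
--             saida.append(texto[prev:p])
--         saida.append(delimitador)
--         prev = p + L
--     if prev < n:
--         saida.append(texto[prev:])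
--     return saida
-- ===== Notes on version B (the rewrite author's own statement) =====
-- stated objective: alternative
-- what changed: Replaces A's one-pass buffer/secaoDelimitador state machine by two passes: first collect the start indices of the non-overlapping delimiter occurrences, then emit the slice before each occurrence, the delimiter itself, and the final tail; Pre_ only excludes an empty delimitador with non-empty texto, where A loops forever.
import Mathlib
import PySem

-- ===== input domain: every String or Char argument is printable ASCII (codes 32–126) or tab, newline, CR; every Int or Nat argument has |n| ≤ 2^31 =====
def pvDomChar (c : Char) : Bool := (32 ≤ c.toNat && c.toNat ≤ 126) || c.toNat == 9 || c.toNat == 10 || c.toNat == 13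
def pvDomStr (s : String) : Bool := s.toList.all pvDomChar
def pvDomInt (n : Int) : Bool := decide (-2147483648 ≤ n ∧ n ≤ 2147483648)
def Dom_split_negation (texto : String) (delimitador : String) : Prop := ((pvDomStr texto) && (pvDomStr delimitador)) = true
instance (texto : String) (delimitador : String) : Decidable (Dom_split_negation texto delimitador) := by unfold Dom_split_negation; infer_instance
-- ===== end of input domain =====

-- B replaces A's one-pass buffer/flag state machine by two passes (collect delimiter
-- positions, then emit chunks and delimiters); equivalence is about the return value.

-- ===== PORT A =====
-- A's while-loop, step for step, over List Char.  texto[i:i+len(d)] with i ≥ 0 is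
-- exactly (s.drop i).take d.length; fuel = len(texto) suffices since each iteration
-- advances i by at least 1 whenever delimitador ≠ "" (the precondition).
def splitLoopA (s d : List Char) (fuel i : Nat) (saida : List String)
    (buffer : List Char) (flag : Bool) : List String :=
  match fuel with
  | 0 => if buffer ≠ [] then saida ++ [String.ofList buffer] else saida
  | fuel + 1 =>
    if i < s.length then
      if (s.drop i).take d.length = d then
        splitLoopA s d fuel (i + d.length)
          (if buffer ≠ [] then saida ++ [String.ofList buffer] else saida) d true
      else
        if flag then
          splitLoopA s d fuel (i + 1) (saida ++ [String.ofList buffer]) ((s.drop i).take 1) false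
        else
          splitLoopA s d fuel (i + 1) saida (buffer ++ (s.drop i).take 1) flag
    else
      if buffer ≠ [] then saida ++ [String.ofList buffer] else saida

def split_negation (texto : String) (delimitador : String) : List String :=
  splitLoopA texto.toList delimitador.toList texto.toList.length 0 [] [] false

-- ===== PORT B =====
-- pass 1 of Source B: collect the start index of every (non-overlapping) delimiter occurrence
def scanPos (s d : List Char) (fuel i : Nat) (acc : List Nat) : List Nat :=
  match fuel with
  | 0 => acc
  | fuel + 1 =>
    if i < s.length then
      if (s.drop i).take d.length = d then scanPos s d fuel (i + d.length) (acc ++ [i])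
      else scanPos s d fuel (i + 1) acc
    else acc

-- pass 2 of Source B: emit the chunk before each occurrence, the delimiter, then the tail
def emitTok (s d : List Char) (ps : List Nat) (prev : Nat) : List String :=
  match ps with
  | [] => if prev < s.length then [String.ofList (s.drop prev)] else []
  | p :: rest =>
      (if prev < p then [String.ofList ((s.drop prev).take (p - prev))] else []) ++
        String.ofList d :: emitTok s d rest (p + d.length)

def split_negation_alt (texto : String) (delimitador : String) : List String :=
  emitTok texto.toList delimitador.toList
    (scanPos texto.toList delimitador.toList texto.toList.length 0 []) 0

-- ===== PRECONDITION & SPEC =====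
-- Pre_ excludes only delimitador = "" with texto ≠ "", where A loops forever (i += 0).
def Pre_split_negation (texto : String) (delimitador : String) : Prop :=
  delimitador ≠ "" ∨ texto = ""
instance (texto : String) (delimitador : String) : Decidable (Pre_split_negation texto delimitador) := by
  unfold Pre_split_negation; infer_instance

def pvWitness_split_negation : String × String := ("no-a-b", "-")

def Spec_split_negation (texto : String) (delimitador : String) (out : List String) : Prop := out = split_negation_alt texto delimitador
instance (texto : String) (delimitador : String) (out : List String) : Decidable (Spec_split_negation texto delimitador out) := by unfold Spec_split_negation; infer_instance

-- ===== CLAIM (what is proved, stated in full; the proofs are below) =====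
def Claim_equal_split_negation : Prop := ∀ (texto : String) (delimitador : String), Dom_split_negation texto delimitador → Pre_split_negation texto delimitador → Spec_split_negation texto delimitador (split_negation texto delimitador)

-- ===== LEMMAS AND PROOFS =====

theorem scanPos_acc (s d : List Char) (fuel : Nat) :
    ∀ i acc, scanPos s d fuel i acc = acc ++ scanPos s d fuel i [] := by
  induction fuel with
  | zero => intro i acc; simp [scanPos]
  | succ fuel ih =>
    intro i acc
    simp only [scanPos]
    split_ifs with h1 h2
    · rw [ih (i + d.length) (acc ++ [i])]
      simp only [List.nil_append]
      rw [ih (i + d.length) [i]]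
      simp
    · rw [ih (i + 1) acc]
    · simp

theorem match_le {s d : List Char} {i : Nat} (hi : i ≤ s.length)
    (hm : (s.drop i).take d.length = d) : i + d.length ≤ s.length := by
  have := congrArg List.length hm
  simp [List.length_take, List.length_drop] at this
  omega

theorem seg_ne_nil (s : List Char) (prev i : Nat) (h1 : prev ≤ i) (h2 : i ≤ s.length) :
    ((s.drop prev).take (i - prev) ≠ []) ↔ prev < i := by
  rw [ne_eq, ← List.length_eq_zero_iff]
  simp [List.length_take, List.length_drop]
  omega

theorem seg_extend (s : List Char) (prev i : Nat) (h1 : prev ≤ i) (h2 : i < s.length) :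
    (s.drop prev).take (i - prev) ++ (s.drop i).take 1 = (s.drop prev).take (i + 1 - prev) := by
  obtain ⟨k, rfl⟩ : ∃ k, i = prev + k := ⟨i - prev, by omega⟩
  have hdd : s.drop (prev + k) = (s.drop prev).drop k := by
    rw [List.drop_drop]
  rw [hdd]
  have hk : k < (s.drop prev).length := by simp [List.length_drop]; omega
  rw [List.drop_eq_getElem_cons hk]
  have h3 : prev + k + 1 - prev = k + 1 := by omega
  rw [show (1:Nat) = 0+1 from rfl, List.take_succ_cons, List.take_zero, h3, List.take_add_one]
  simp [List.getElem?_eq_getElem hk]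

theorem seg_full (s : List Char) (prev : Nat) :
    (s.drop prev).take (s.length - prev) = s.drop prev := by
  apply List.take_of_length_le; simp

theorem main_lemma (s d : List Char) (hd : d ≠ []) (fuel : Nat) :
    ∀ i prev saida, prev ≤ i → i ≤ s.length → s.length ≤ i + fuel →
      (splitLoopA s d fuel i saida ((s.drop prev).take (i - prev)) false
          = saida ++ emitTok s d (scanPos s d fuel i []) prev) ∧
      (splitLoopA s d fuel i saida d true
          = saida ++ String.ofList d :: emitTok s d (scanPos s d fuel i []) i) := by
  have hdl : 1 ≤ d.length := by
    cases d with
    | nil => exact absurd rfl hd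
    | cons a t => simp
  induction fuel with
  | zero =>
    intro i prev saida h1 h2 h3
    have hin : i = s.length := by omega
    subst hin
    constructor
    · simp only [splitLoopA, scanPos, emitTok, seg_full]
      by_cases hp : prev < s.length
      · rw [if_pos (by rw [ne_eq, ← List.length_eq_zero_iff]; simp; omega), if_pos hp]
      · rw [if_neg (by rw [ne_eq, not_not, ← List.length_eq_zero_iff]; simp; omega), if_neg hp]
        try simp
    · simp [splitLoopA, scanPos, emitTok, hd]
  | succ fuel ih =>
    intro i prev saida h1 h2 h3
    by_cases hi : i < s.length
    · by_cases hm : (s.drop i).take d.length = d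
      · -- delimiter matches at i
        have hin : i + d.length ≤ s.length := match_le (by omega) hm
        have hscan : scanPos s d (fuel + 1) i [] = i :: scanPos s d fuel (i + d.length) [] := by
          simp only [scanPos, if_pos hi, if_pos hm]
          rw [scanPos_acc]; simp
        have IH := ih (i + d.length) (i + d.length)
        constructor
        · simp only [splitLoopA, if_pos hi, if_pos hm]
          rw [(ih (i + d.length) prev _ (by omega) hin (by omega)).2]
          rw [hscan]
          simp only [emitTok]
          by_cases hp : prev < i
          · rw [if_pos ((seg_ne_nil s prev i h1 (by omega)).2 hp), if_pos hp]; simp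
          · rw [if_neg (by rw [seg_ne_nil s prev i h1 (by omega)]; exact hp), if_neg hp]; simp
        · simp only [splitLoopA, if_pos hi, if_pos hm,
            if_pos (show d ≠ [] from hd)]
          rw [(ih (i + d.length) i _ (by omega) hin (by omega)).2]
          rw [hscan]
          simp [emitTok]
      · -- no match at i
        have hscan : scanPos s d (fuel + 1) i [] = scanPos s d fuel (i + 1) [] := by
          simp only [scanPos, if_pos hi, if_neg hm]
        constructor
        · simp only [splitLoopA, if_pos hi, if_neg hm, if_neg (Bool.false_ne_true)]
          rw [seg_extend s prev i h1 hi]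
          rw [(ih (i + 1) prev saida (by omega) (by omega) (by omega)).1, hscan]
        · simp only [splitLoopA, if_pos hi, if_neg hm]
          have hseg : (s.drop i).take 1 = (s.drop i).take (i + 1 - i) := by congr 1; omega
          rw [hseg, (ih (i + 1) i (saida ++ [String.ofList d]) (by omega) (by omega) (by omega)).1,
            hscan]
          simp
    · -- i ≥ len: loop exits
      have hin : i = s.length := by omega
      subst hin
      constructor
      · simp only [splitLoopA, if_neg hi, scanPos, emitTok, seg_full]
        by_cases hp : prev < s.length
        · rw [if_pos (by rw [ne_eq, ← List.length_eq_zero_iff]; simp; omega), if_pos hp]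
        · rw [if_neg (by rw [ne_eq, not_not, ← List.length_eq_zero_iff]; simp; omega), if_neg hp]
          try simp
      · simp [splitLoopA, scanPos, emitTok, hd]

-- ===== VERDICT (by name: the statement is the Claim_ definition above) =====
theorem split_negation_spec : Claim_equal_split_negation := by
  intro texto delimitador _ hpre
  unfold Spec_split_negation split_negation split_negation_alt
  by_cases ht : texto.toList = []
  · rw [ht]; simp [splitLoopA, scanPos, emitTok]
  · have hd : delimitador.toList ≠ [] := by
      rcases hpre with h | h
      · intro hc; exact h (by rwa [String.toList_eq_nil_iff] at hc)
      · exact absurd (by rw [h]; rfl) ht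
    have := (main_lemma texto.toList delimitador.toList hd texto.toList.length 0 0 []
      (le_refl 0) (Nat.zero_le _) (by omega)).1
    simpa using this
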